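-- pv_equiv track=rewrite | github.com/mohammadfaiizan/ProjectI | DSA/Problem/Trie/04_Suffix_Trees_Advanced_Structures/1178_Number_of_Valid_Words_for_Each_Puzzle.py | findNumOfValidWords6
-- ===== SOURCE A (Python) =====
-- from typing import List, Dict, Set
-- from collections import defaultdict, Counter
--
-- def findNumOfValidWords6(words: List[str], puzzles: List[str]) -> List[int]:
--     """
--     Approach 6: Dynamic Programming with Memoization
--
--     Use DP to avoid recomputing submask counts.
--
--     Time: O(W + P * 2^unique_chars)
--     Space: O(2^max_unique_chars)
--     """
--     def char_to_bit(c: str) -> int: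
--         return ord(c) - ord('a')
--
--     def word_to_mask(word: str) -> int:
--         mask = 0
--         for char in word:
--             mask |= 1 << char_to_bit(char)
--         return mask
--
--     # Precompute word mask counts
--     word_mask_count = Counter()
--     for word in words:
--         mask = word_to_mask(word)
--         word_mask_count[mask] += 1
--
--     # Memoization for submask generation
--     submask_cache = {}
--
--     def get_submasks(mask: int) -> List[int]:
--         """Get all submasks of given mask with memoization"""
--         if mask in submask_cache:
--             return submask_cache[mask]
--
--         submasks = []
--         submask = mask
--         while submask > 0:
--             submasks.append(submask)
--             submask = (submask - 1) & mask
--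
--         submask_cache[mask] = submasks
--         return submasks
--
--     result = []
--
--     for puzzle in puzzles:
--         puzzle_mask = word_to_mask(puzzle)
--         first_bit = 1 << char_to_bit(puzzle[0])
--         count = 0
--
--         # Get all submasks
--         submasks = get_submasks(puzzle_mask)
--
--         for submask in submasks:
--             if submask & first_bit:  # Contains first character
--                 count += word_mask_count[submask]
--
--         result.append(count)
--
--     return result
-- ===== SOURCE B (Python) =====
-- from typing import List
--
-- def findNumOfValidWords6(words: List[str], puzzles: List[str]) -> List[int]:
--     # Direct per-word subset test via bitmasks: precompute each word's mask once,
--     # then for each puzzle count the word masks contained in the puzzle mask that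
--     # include the puzzle's first letter. No Counter, no submask enumeration, no cache.
--     word_masks = []
--     for word in words:
--         m = 0
--         for ch in word:
--             m |= 1 << (ord(ch) - ord('a'))
--         word_masks.append(m)
--
--     result = []
--     for puzzle in puzzles:
--         pm = 0
--         for ch in puzzle:
--             pm |= 1 << (ord(ch) - ord('a'))
--         first_bit = 1 << (ord(puzzle[0]) - ord('a'))
--         result.append(sum(1 for m in word_masks if m & pm == m and m & first_bit))
--     return result
-- ===== Notes on version B (the rewrite author's own statement) =====
-- stated objective: simpler
-- what changed: Replaces A's Counter of word masks plus memoized enumeration of all submasks of each puzzle mask with a direct scan: each word's mask is precomputed once and, per puzzle, a word is counted iff its mask is a subset of the puzzle mask and contains the first letter's bit.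
import Mathlib
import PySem

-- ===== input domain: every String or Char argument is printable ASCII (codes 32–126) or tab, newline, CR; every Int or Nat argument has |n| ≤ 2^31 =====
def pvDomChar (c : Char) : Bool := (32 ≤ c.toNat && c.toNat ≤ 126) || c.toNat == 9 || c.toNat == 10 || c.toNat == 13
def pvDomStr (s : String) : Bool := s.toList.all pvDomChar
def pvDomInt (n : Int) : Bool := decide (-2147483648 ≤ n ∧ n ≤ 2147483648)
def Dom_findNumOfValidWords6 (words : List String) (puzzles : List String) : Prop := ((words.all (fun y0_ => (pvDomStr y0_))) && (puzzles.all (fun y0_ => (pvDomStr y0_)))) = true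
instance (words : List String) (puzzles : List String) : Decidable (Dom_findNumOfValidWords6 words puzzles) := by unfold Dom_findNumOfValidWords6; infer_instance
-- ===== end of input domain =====

-- B replaces A's Counter + memoized submask enumeration by a direct per-word subset
-- test on precomputed word masks (simpler; not claimed faster).

-- ===== PORT A =====
-- ord(c) - ord('a')  (exact for chars ≥ 'a'; Python raises on smaller chars at the shift, excluded by Pre_)
def charToBit (c : Char) : Nat := c.toNat - 97

def wordToMask (w : String) : Nat :=
  w.toList.foldl (fun m c => m ||| (1 <<< charToBit c)) 0

-- the `while submask > 0` loop of get_submasks, appending to the collected list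
def submaskLoop (mask : Nat) (s : Nat) (acc : List Nat) : List Nat :=
  if 0 < s then submaskLoop mask ((s - 1) &&& mask) (acc ++ [s]) else acc
  termination_by s
  decreasing_by exact Nat.lt_of_le_of_lt Nat.and_le_left (by omega)

-- get_submasks with the memo cache passed explicitly (A's submask_cache)
def getSubmasks (cache : PySem.Dict Nat (List Nat)) (mask : Nat) :
    List Nat × PySem.Dict Nat (List Nat) :=
  match cache.get? mask with
  | some l => (l, cache)
  | none => (submaskLoop mask mask [], cache.insert mask (submaskLoop mask mask []))

-- one iteration of A's `for puzzle in puzzles` loop; state = (submask_cache, result)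
def pStep (wmc : PySem.Dict Nat Int) (st : PySem.Dict Nat (List Nat) × List Int)
    (p : String) : PySem.Dict Nat (List Nat) × List Int :=
  let pm := wordToMask p
  let fb := 1 <<< charToBit ((PySem.Str.pyGet? p 0).getD 'a')  -- p[0]; IndexError on "" is outside Pre_
  let r := getSubmasks st.1 pm
  let cnt := r.1.foldl (fun c s => if s &&& fb ≠ 0 then c + wmc.getD s 0 else c) 0
  (r.2, st.2 ++ [cnt])

def findNumOfValidWords6 (words : List String) (puzzles : List String) : List Int :=
  let wmc : PySem.Dict Nat Int :=
    words.foldl (fun d w => d.modify (wordToMask w) 0 (· + 1)) PySem.Dict.empty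
  (puzzles.foldl (pStep wmc) (PySem.Dict.empty, [])).2

-- ===== PORT B =====
def altWordMask (w : String) : Nat :=
  w.toList.foldl (fun m c => m ||| (1 <<< (c.toNat - 97))) 0

def findNumOfValidWords6_alt (words : List String) (puzzles : List String) : List Int :=
  let wordMasks := words.map altWordMask
  puzzles.map (fun p =>
    let pm := altWordMask p
    let fb := 1 <<< (((PySem.Str.pyGet? p 0).getD 'a').toNat - 97)  -- p[0]; "" outside Pre_
    ((wordMasks.countP (fun m => m &&& pm == m && m &&& fb != 0) : Nat) : Int))

-- ===== PRECONDITION & SPEC =====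
-- Pre_ excludes exactly the inputs where the Python A raises: an empty puzzle (IndexError on
-- puzzle[0]) and any character below 'a' in a word or puzzle (ValueError: negative shift count).
def Pre_findNumOfValidWords6 (words : List String) (puzzles : List String) : Prop :=
  (words.all (fun w => w.toList.all (fun c => 97 ≤ c.toNat)) &&
   puzzles.all (fun p => !p.toList.isEmpty && p.toList.all (fun c => 97 ≤ c.toNat))) = true
instance (words : List String) (puzzles : List String) : Decidable (Pre_findNumOfValidWords6 words puzzles) := by unfold Pre_findNumOfValidWords6; infer_instance

def pvWitness_findNumOfValidWords6 : List String × List String :=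
  (["ab", "b"], ["ab"])

def Spec_findNumOfValidWords6 (words : List String) (puzzles : List String) (out : List Int) : Prop := out = findNumOfValidWords6_alt words puzzles
instance (words : List String) (puzzles : List String) (out : List Int) : Decidable (Spec_findNumOfValidWords6 words puzzles out) := by unfold Spec_findNumOfValidWords6; infer_instance

-- ===== CLAIM (what is proved, stated in full; the proofs are below) =====
def Claim_equal_findNumOfValidWords6 : Prop := ∀ (words : List String) (puzzles : List String), Dom_findNumOfValidWords6 words puzzles → Pre_findNumOfValidWords6 words puzzles → Spec_findNumOfValidWords6 words puzzles (findNumOfValidWords6 words puzzles)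

-- ===== LEMMAS AND PROOFS =====

-- low-bit/high-bits decomposition of &&&
lemma and_halves (x y : Nat) :
    x &&& y = 2 * (x / 2 &&& y / 2) + (x % 2) * (y % 2) := by
  conv_lhs => rw [← Nat.bit_decide_mod_two_eq_one_shiftRight_one x,
                  ← Nat.bit_decide_mod_two_eq_one_shiftRight_one y]
  rw [Nat.land_bit, Nat.bit_val, Nat.shiftRight_one, Nat.shiftRight_one]
  rcases Nat.mod_two_eq_zero_or_one x with hx | hx <;>
    rcases Nat.mod_two_eq_zero_or_one y with hy | hy <;> simp [hx, hy]

-- key fact behind the submask loop: (s-1) &&& pm is an upper bound for every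
-- submask of pm strictly below a submask s
lemma land_key : ∀ s, 0 < s → ∀ pm t, s &&& pm = s → t &&& pm = t → t < s →
    t ≤ (s - 1) &&& pm := by
  intro s
  induction s using Nat.strong_induction_on with
  | _ s ih =>
    intro hs pm t hspm htpm hts
    have hxs := and_halves s pm
    have hxt := and_halves t pm
    have hxm := and_halves (s - 1) pm
    rw [hspm] at hxs
    rw [htpm] at hxt
    rcases Nat.mod_two_eq_zero_or_one s with hsb | hsb
    · -- s even, s/2 > 0
      rw [hsb, Nat.zero_mul, Nat.add_zero] at hxs
      have h1 : (s - 1) / 2 = s / 2 - 1 := by omega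
      have h2 : (s - 1) % 2 = 1 := by omega
      rw [h1, h2, Nat.one_mul] at hxm
      have hA : s / 2 &&& pm / 2 = s / 2 := by omega
      have hBtb : t / 2 &&& pm / 2 = t / 2 ∧ t % 2 ≤ pm % 2 := by
        rcases Nat.mod_two_eq_zero_or_one t with ht | ht <;>
          rcases Nat.mod_two_eq_zero_or_one pm with hp | hp <;>
            rw [ht, hp] at hxt <;> constructor <;> omega
      have hrec : t / 2 ≤ (s / 2 - 1) &&& pm / 2 :=
        ih (s / 2) (by omega) (by omega) (pm / 2) (t / 2) hA hBtb.1 (by omega)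
      omega
    · -- s odd ⇒ pm odd and (s-1) &&& pm = s - 1
      have hp : pm % 2 = 1 := by
        rcases Nat.mod_two_eq_zero_or_one pm with hp | hp
        · rw [hsb, hp, Nat.mul_zero] at hxs; omega
        · exact hp
      rw [hsb, hp, Nat.one_mul] at hxs
      have h1 : (s - 1) / 2 = s / 2 := by omega
      have h2 : (s - 1) % 2 = 0 := by omega
      rw [h1, h2, Nat.zero_mul, Nat.add_zero] at hxm
      omega

lemma land_land_self (x pm : Nat) : (x &&& pm) &&& pm = x &&& pm := by
  rw [Nat.land_assoc, Nat.and_self]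

lemma submaskLoop_acc (pm : Nat) : ∀ s acc, submaskLoop pm s acc = acc ++ submaskLoop pm s [] := by
  intro s
  induction s using Nat.strong_induction_on with
  | _ s ih =>
    intro acc
    conv_lhs => rw [submaskLoop.eq_def]
    conv_rhs => rw [submaskLoop.eq_def]
    by_cases h : 0 < s
    · simp only [h, if_pos]
      rw [ih ((s - 1) &&& pm) (Nat.lt_of_le_of_lt Nat.and_le_left (by omega)) (acc ++ [s]),
          ih ((s - 1) &&& pm) (Nat.lt_of_le_of_lt Nat.and_le_left (by omega)) ([] ++ [s])]
      simp
    · simp [h]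

lemma mem_submaskLoop (pm : Nat) : ∀ s, s &&& pm = s → ∀ t,
    (t ∈ submaskLoop pm s [] ↔ 0 < t ∧ t ≤ s ∧ t &&& pm = t) := by
  intro s
  induction s using Nat.strong_induction_on with
  | _ s ih =>
    intro hs t
    conv_lhs => rw [submaskLoop.eq_def]
    by_cases h : 0 < s
    · simp only [h, if_pos]
      rw [submaskLoop_acc pm ((s - 1) &&& pm) ([] ++ [s])]
      have hlt : (s - 1) &&& pm < s := Nat.lt_of_le_of_lt Nat.and_le_left (by omega)
      rw [List.nil_append, List.cons_append, List.nil_append, List.mem_cons,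
        ih ((s - 1) &&& pm) hlt (land_land_self _ _) t]
      constructor
      · rintro (rfl | ⟨h1, h2, h3⟩)
        · exact ⟨h, le_refl _, hs⟩
        · exact ⟨h1, le_trans h2 (le_of_lt hlt), h3⟩
      · rintro ⟨h1, h2, h3⟩
        rcases eq_or_lt_of_le h2 with rfl | h2'
        · exact Or.inl rfl
        · exact Or.inr ⟨h1, land_key s h pm t hs h3 h2', h3⟩
    · rw [if_neg h]
      simp only [List.not_mem_nil, false_iff]
      rintro ⟨h1, h2, h3⟩
      omega

lemma nodup_submaskLoop (pm : Nat) : ∀ s, s &&& pm = s → (submaskLoop pm s []).Nodup := by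
  intro s
  induction s using Nat.strong_induction_on with
  | _ s ih =>
    intro hs
    rw [submaskLoop.eq_def]
    by_cases h : 0 < s
    · simp only [h, if_pos]
      rw [submaskLoop_acc pm ((s - 1) &&& pm) ([] ++ [s])]
      have hlt : (s - 1) &&& pm < s := Nat.lt_of_le_of_lt Nat.and_le_left (by omega)
      rw [List.nil_append, List.cons_append, List.nil_append, List.nodup_cons]
      refine ⟨fun hmem => ?_, ih _ hlt (land_land_self _ _)⟩
      have := (mem_submaskLoop pm _ (land_land_self (s - 1) pm) s).mp hmem
      omega
    · simp [h]

lemma countP_cons_split (t : Nat) (L : List Nat) (ht : t ∉ L) (P : Nat → Bool) :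
    ∀ ms : List Nat, ms.countP (fun m => decide (m ∈ t :: L) && P m) =
      (if P t then ms.count t else 0) + ms.countP (fun m => decide (m ∈ L) && P m) := by
  intro ms
  induction ms with
  | nil => simp
  | cons m ms ihm =>
    simp only [List.countP_cons, List.count_cons, ihm]
    by_cases hmt : m = t
    · subst hmt
      have : m ∉ L := ht
      by_cases hP : P m <;> simp [this, hP] <;> omega
    · by_cases hmL : m ∈ L <;> by_cases hP : P m <;>
        simp [hmt, hmL, hP] <;> omega

lemma foldl_count (ms : List Nat) (P : Nat → Bool) :
    ∀ (L : List Nat) (c0 : Int), L.Nodup →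
      L.foldl (fun c s => if P s then c + ((ms.count s : Nat) : Int) else c) c0 =
        c0 + ((ms.countP (fun m => decide (m ∈ L) && P m) : Nat) : Int) := by
  intro L
  induction L with
  | nil => intro c0 _; simp
  | cons t L ihL =>
    intro c0 hnd
    rw [List.nodup_cons] at hnd
    rw [List.foldl_cons, ihL _ hnd.2, countP_cons_split t L hnd.1 P ms]
    by_cases hP : P t <;> simp [hP] <;> ring

-- the word-mask counter looks up to the number of words with that mask
lemma wmc_getD (words : List String) (s : Nat) :
    (words.foldl (fun d w => d.modify (wordToMask w) 0 (· + 1)) PySem.Dict.empty).getD s 0 =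
      (((words.map wordToMask).count s : Nat) : Int) := by
  rw [show words.foldl (fun d w => d.modify (wordToMask w) 0 (· + 1)) PySem.Dict.empty
      = (words.map wordToMask).foldl
          (fun (d : PySem.Dict Nat Int) m => d.modify m 0 (· + 1)) PySem.Dict.empty
    from by rw [List.foldl_map]]
  rw [PySem.Dict.getD_foldl_modify_add_one]
  simp

-- A's count for one puzzle (cache-free form; getSubmasks returns exactly this list)
def puzzleCountA (wmc : PySem.Dict Nat Int) (p : String) : Int :=
  let pm := wordToMask p
  let fb := 1 <<< charToBit ((PySem.Str.pyGet? p 0).getD 'a')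
  (submaskLoop pm pm []).foldl (fun c s => if s &&& fb ≠ 0 then c + wmc.getD s 0 else c) 0

-- the cache is pure memoization: the puzzle loop produces the cache-free counts
lemma pStep_foldl (wmc : PySem.Dict Nat Int) :
    ∀ (ps : List String) (cache : PySem.Dict Nat (List Nat)) (res : List Int),
      (∀ m l, cache.get? m = some l → l = submaskLoop m m []) →
      (ps.foldl (pStep wmc) (cache, res)).2 = res ++ ps.map (puzzleCountA wmc) := by
  intro ps
  induction ps with
  | nil => intro cache res _; simp
  | cons p ps ihp =>
    intro cache res hinv
    rw [List.foldl_cons, List.map_cons]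
    have hstep : pStep wmc (cache, res) p =
        ((getSubmasks cache (wordToMask p)).2, res ++ [puzzleCountA wmc p]) := by
      unfold pStep puzzleCountA
      rcases hc : cache.get? (wordToMask p) with _ | l
      · simp [getSubmasks, hc]
      · have hl : l = submaskLoop (wordToMask p) (wordToMask p) [] := hinv _ _ hc
        simp [getSubmasks, hc, hl]
    have hinv' : ∀ m l, (getSubmasks cache (wordToMask p)).2.get? m = some l →
        l = submaskLoop m m [] := by
      intro m l hml
      unfold getSubmasks at hml
      rcases hc : cache.get? (wordToMask p) with _ | l' <;> rw [hc] at hml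
      · simp only at hml
        rw [PySem.Dict.get?_insert] at hml
        split at hml
        · rename_i hm
          subst hm
          injection hml with h
          exact h.symm
        · exact hinv m l hml
      · exact hinv m l hml
    rw [hstep, ihp _ _ hinv']
    simp

lemma wordToMask_eq_alt : wordToMask = altWordMask := by
  funext w
  rfl

-- A's per-puzzle count equals B's per-puzzle count
lemma puzzleCountA_eq (words : List String) (p : String) :
    puzzleCountA (words.foldl (fun d w => d.modify (wordToMask w) 0 (· + 1)) PySem.Dict.empty) p =
      (((words.map altWordMask).countP
        (fun m => m &&& altWordMask p == m &&
          m &&& (1 <<< (((PySem.Str.pyGet? p 0).getD 'a').toNat - 97)) != 0) : Nat) : Int) := by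
  simp only [puzzleCountA]
  rw [show (fun (c : Int) (s : Nat) =>
        if s &&& 1 <<< charToBit ((PySem.Str.pyGet? p 0).getD 'a') ≠ 0 then
          c + (words.foldl (fun d w => d.modify (wordToMask w) 0 (· + 1))
            PySem.Dict.empty).getD s 0
        else c) =
      (fun (c : Int) (s : Nat) =>
        if (fun s => decide (s &&& 1 <<< charToBit ((PySem.Str.pyGet? p 0).getD 'a') ≠ 0)) s = true then
          c + (((words.map wordToMask).count s : Nat) : Int)
        else c)
    from by funext c s; rw [wmc_getD]; simp]
  rw [foldl_count (words.map wordToMask) _ _ 0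
    (nodup_submaskLoop (wordToMask p) (wordToMask p) (Nat.and_self _))]
  rw [Int.zero_add, wordToMask_eq_alt]
  congr 1
  apply List.countP_congr
  intro m _
  have hmem := mem_submaskLoop (altWordMask p) (altWordMask p) (Nat.and_self _) m
  have hfbdef : charToBit ((PySem.Str.pyGet? p 0).getD 'a') =
      ((PySem.Str.pyGet? p 0).getD 'a').toNat - 97 := rfl
  rw [hfbdef]
  set fb := 1 <<< (((PySem.Str.pyGet? p 0).getD 'a').toNat - 97) with hfb
  by_cases hz : m &&& fb = 0
  · simp [hz]
  · by_cases hsub : m &&& altWordMask p = m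
    · have h0 : 0 < m := by
        rcases Nat.eq_zero_or_pos m with rfl | h
        · exact absurd (Nat.zero_and fb) hz
        · exact h
      have hle : m ≤ altWordMask p := by
        conv_lhs => rw [← hsub]
        exact Nat.and_le_right
      simp [hz, hsub, hmem.mpr ⟨h0, hle, hsub⟩]
    · have : m ∉ submaskLoop (altWordMask p) (altWordMask p) [] := fun hm => hsub (hmem.mp hm).2.2
      simp [hz, hsub, this]

-- ===== VERDICT (by name: the statement is the Claim_ definition above) =====
theorem findNumOfValidWords6_spec : Claim_equal_findNumOfValidWords6 := by
  intro words puzzles _ _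
  show findNumOfValidWords6 words puzzles = findNumOfValidWords6_alt words puzzles
  unfold findNumOfValidWords6 findNumOfValidWords6_alt
  rw [pStep_foldl _ puzzles PySem.Dict.empty []
    (by intro m l h; simp [PySem.Dict.get?_empty] at h)]
  rw [List.nil_append]
  apply List.map_congr_left
  intro p _
  exact puzzleCountA_eq words p
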